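-- pv_equiv track=rewrite | github.com/justinschembri/nlp4ged | nlp4ged/support/text_processing.py | replace_numeric_oridinals
-- ===== SOURCE A (Python) =====
-- def replace_numeric_oridinals(text:str):
--     new_text = text
--     numeric_ordinals = ["1st", "2nd", "3rd", "4th", "5th",
--                         "6th", "7th", "8th", "9th"]
--     string_ord = ["first", "second", "third", "fourth", "fifth",
--                         "sixth", "seventh", "eighth", "ninth"]
--     ordinals_map = dict(zip(numeric_ordinals, string_ord))
--
--     for numeric_ordinal in ordinals_map:
--         new_text = new_text.replace(numeric_ordinal, ordinals_map[numeric_ordinal])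
--     return new_text
-- ===== SOURCE B (Python) =====
-- def replace_numeric_oridinals(text: str):
--     words = {"1": "first", "2": "second", "3": "third", "4": "fourth",
--              "5": "fifth", "6": "sixth", "7": "seventh", "8": "eighth",
--              "9": "ninth"}
--     suffix = {"1": "st", "2": "nd", "3": "rd", "4": "th", "5": "th",
--               "6": "th", "7": "th", "8": "th", "9": "th"}
--     out = []
--     i = 0
--     n = len(text)
--     while i < n:
--         c = text[i]
--         if c in words and text[i+1:i+3] == suffix[c]:
--             out.append(words[c])
--             i += 3
--         else:
--             out.append(c)
--             i += 1
--     return "".join(out)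
-- ===== Notes on version B (the rewrite author's own statement) =====
-- stated objective: alternative
-- what changed: A runs nine independent full-text str.replace passes (one per numeric ordinal); B makes a single left-to-right scan over the text, replacing each 3-character ordinal token as it is met, so the text is traversed once instead of nine times.
-- intended difference: On texts containing a digit 4-9 immediately followed by '3rd' (e.g. '43rd'), A's '3rd' pass inserts 'third' right after the digit and a later pass then matches the freshly created 'Xth' across the insertion boundary, so A returns e.g. 'fourthird'; B replaces only tokens present in the original text and returns '4third', the intended non-cascading replacement. — e.g. on replace_numeric_oridinals("43rd"): A returns "fourthird", B returns "4third"
import Mathlib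
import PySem

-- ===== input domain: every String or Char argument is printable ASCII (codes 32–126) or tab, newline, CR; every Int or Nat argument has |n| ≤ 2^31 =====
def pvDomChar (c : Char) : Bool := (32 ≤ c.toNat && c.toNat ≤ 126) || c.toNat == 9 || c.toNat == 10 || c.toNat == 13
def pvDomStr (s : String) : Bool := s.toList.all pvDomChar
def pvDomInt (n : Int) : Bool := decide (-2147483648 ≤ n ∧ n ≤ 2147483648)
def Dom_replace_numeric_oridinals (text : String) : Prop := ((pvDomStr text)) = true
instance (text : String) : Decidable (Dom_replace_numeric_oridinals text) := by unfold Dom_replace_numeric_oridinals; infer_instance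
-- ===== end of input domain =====

-- B replaces the nine numeric ordinals in ONE left-to-right scan instead of A's nine
-- sequential full-text replace passes; return value only, no mutation on either side.

-- ===== PORT A =====
def replace_numeric_oridinals (text : String) : String :=
  let numeric_ordinals : List String := ["1st","2nd","3rd","4th","5th","6th","7th","8th","9th"]
  let string_ord : List String := ["first","second","third","fourth","fifth","sixth","seventh","eighth","ninth"]
  let ordinals_map : PySem.Dict String String := PySem.Dict.ofList (numeric_ordinals.zip string_ord)
  -- 'for numeric_ordinal in ordinals_map' iterates the keys in insertion order;
  -- ordinals_map[numeric_ordinal] never misses (the key comes from the dict), so getD's default is dead.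
  ordinals_map.keys.foldl
    (fun new_text numeric_ordinal =>
      PySem.Str.replace new_text numeric_ordinal ((ordinals_map.get? numeric_ordinal).getD ""))
    text

-- ===== PORT B =====
def pvWords : PySem.Dict Char (List Char) := PySem.Dict.ofList
  [('1', "first".toList), ('2', "second".toList), ('3', "third".toList),
   ('4', "fourth".toList), ('5', "fifth".toList), ('6', "sixth".toList),
   ('7', "seventh".toList), ('8', "eighth".toList), ('9', "ninth".toList)]

def pvSuffix : PySem.Dict Char (List Char) := PySem.Dict.ofList
  [('1', "st".toList), ('2', "nd".toList), ('3', "rd".toList),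
   ('4', "th".toList), ('5', "th".toList), ('6', "th".toList),
   ('7', "th".toList), ('8', "th".toList), ('9', "th".toList)]

-- Source B's while-loop over the index: structural recursion on the character list;
-- 'c in words and text[i+1:i+3] == suffix[c]' is the get?-match plus the take-2 test.
def scanB : List Char → List Char
  | [] => []
  | c :: t =>
    match pvWords.get? c with
    | some w => if t.take 2 = pvSuffix.getD c [] then w ++ scanB (t.drop 2) else c :: scanB t
    | none => c :: scanB t
termination_by l => l.length
decreasing_by all_goals (simp [List.length_drop]; try omega)

def replace_numeric_oridinals_alt (text : String) : String :=
  String.ofList (scanB text.toList)   -- ''.join(out)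

-- ===== PRECONDITION & SPEC =====
-- On texts containing a digit 4-9 immediately followed by "3rd" (e.g. "43rd"), A's '3rd' pass
-- inserts 'third' after the digit and a later pass matches the freshly created 'Xth' across the
-- insertion boundary (A returns e.g. "fourthird"); B replaces only tokens of the original text
-- and returns "4third", the intended non-cascading replacement.
def pvInfix (p l : List Char) : Bool := l.tails.any p.isPrefixOf

def D_replace_numeric_oridinals (text : String) : Prop :=
  (['4','5','6','7','8','9'].any fun d => pvInfix [d, '3', 'r', 'd'] text.toList) = true
instance (text : String) : Decidable (D_replace_numeric_oridinals text) := by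
  unfold D_replace_numeric_oridinals; infer_instance

def Spec_replace_numeric_oridinals (text : String) (out : String) : Prop :=
  ¬ D_replace_numeric_oridinals text → out = replace_numeric_oridinals_alt text
instance (text : String) (out : String) : Decidable (Spec_replace_numeric_oridinals text out) := by
  unfold Spec_replace_numeric_oridinals; infer_instance

def pvDiffWitness_replace_numeric_oridinals : String := "43rd"
def pvDiffWitnessOut_replace_numeric_oridinals : String × String := ("fourthird", "4third")

-- ===== CLAIM (what is proved, stated in full; the proofs are below) =====
def Claim_unchanged_replace_numeric_oridinals : Prop :=
  ∀ (text : String), Dom_replace_numeric_oridinals text →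
    Spec_replace_numeric_oridinals text (replace_numeric_oridinals text)
def Claim_changed_replace_numeric_oridinals : Prop :=
  Dom_replace_numeric_oridinals (pvDiffWitness_replace_numeric_oridinals) ∧
  D_replace_numeric_oridinals (pvDiffWitness_replace_numeric_oridinals) ∧
  replace_numeric_oridinals (pvDiffWitness_replace_numeric_oridinals) = pvDiffWitnessOut_replace_numeric_oridinals.1 ∧
  replace_numeric_oridinals_alt (pvDiffWitness_replace_numeric_oridinals) = pvDiffWitnessOut_replace_numeric_oridinals.2 ∧
  pvDiffWitnessOut_replace_numeric_oridinals.1 ≠ pvDiffWitnessOut_replace_numeric_oridinals.2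
def Claim_exact_replace_numeric_oridinals : Prop :=
  ∀ (text : String), Dom_replace_numeric_oridinals text → D_replace_numeric_oridinals text →
    replace_numeric_oridinals text ≠ replace_numeric_oridinals_alt text

-- ===== LEMMAS AND PROOFS =====

-- One pattern entry: (digit, two suffix chars, replacement word).
abbrev pvEnt : Type := Char × Char × Char × List Char

def pvPats : List pvEnt :=
  [('1','s','t',"first".toList), ('2','n','d',"second".toList), ('3','r','d',"third".toList),
   ('4','t','h',"fourth".toList), ('5','t','h',"fifth".toList), ('6','t','h',"sixth".toList),
   ('7','t','h',"seventh".toList), ('8','t','h',"eighth".toList), ('9','t','h',"ninth".toList)]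

-- Fuel-free form of one full-text replace pass for a 3-character pattern.
def repl1 (d x y : Char) (w : List Char) : List Char → List Char
  | [] => []
  | c :: t =>
    if [d,x,y].isPrefixOf (c :: t) then w ++ repl1 d x y w (t.drop 2)
    else c :: repl1 d x y w t
termination_by l => l.length
decreasing_by all_goals (simp [List.length_drop]; try omega)


theorem replace_go_eq (d x y : Char) (w : List Char) :
    ∀ (fuel : Nat) (l acc : List Char), l.length ≤ fuel →
      PySem.Chars.replace.go [d,x,y] w fuel l acc = acc.reverse ++ repl1 d x y w l := by
  intro fuel
  induction fuel with
  | zero => intro l acc h; simp at h; subst h; simp [PySem.Chars.replace.go, repl1]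
  | succ n ih =>
    intro l acc h
    match l with
    | [] => simp [PySem.Chars.replace.go, repl1]
    | c :: t =>
      rw [PySem.Chars.replace.go]
      by_cases hp : List.isPrefixOf [d,x,y] (c :: t)
      · simp only [hp, if_true]
        rw [repl1, if_pos hp]
        have hlen : (List.drop [d,x,y].length (c :: t)).length ≤ n := by simp; simp at h; omega
        rw [ih _ _ hlen]
        simp [List.drop]
      · simp only [hp, if_false]
        rw [repl1, if_neg hp]
        rw [ih t (c :: acc) (by simp at h ⊢; omega)]
        simp

theorem chars_replace_eq (d x y : Char) (w s : List Char) :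
    PySem.Chars.replace s [d,x,y] w = repl1 d x y w s := by
  rw [PySem.Chars.replace]
  simp only [List.isEmpty_cons, if_false]
  exact replace_go_eq d x y w s.length s [] (le_refl _)

-- Single scan trying the patterns of P (in order) at every position.
def scanP (P : List pvEnt) : List Char → List Char
  | [] => []
  | c :: t =>
    match P.find? (fun e => c == e.1 && [e.2.1, e.2.2.1].isPrefixOf t) with
    | some e => e.2.2.2 ++ scanP P (t.drop 2)
    | none => c :: scanP P t
termination_by l => l.length
decreasing_by all_goals (simp [List.length_drop]; try omega)


theorem scanP_nil (l : List Char) : scanP [] l = l := by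
  induction l with
  | nil => simp [scanP]
  | cons c t ih => rw [scanP]; simp [ih]


theorem scanP_cons_of_some {P : List pvEnt} {c : Char} {t : List Char} {e : pvEnt}
    (h : P.find? (fun e => c == e.1 && [e.2.1, e.2.2.1].isPrefixOf t) = some e) :
    scanP P (c :: t) = e.2.2.2 ++ scanP P (t.drop 2) := by
  rw [scanP, h]

theorem scanP_cons_of_none {P : List pvEnt} {c : Char} {t : List Char}
    (h : P.find? (fun e => c == e.1 && [e.2.1, e.2.2.1].isPrefixOf t) = none) :
    scanP P (c :: t) = c :: scanP P t := by
  rw [scanP, h]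

theorem repl1_skip (d x y : Char) (w : List Char) :
    ∀ (u v : List Char), d ∉ u → repl1 d x y w (u ++ v) = u ++ repl1 d x y w v := by
  intro u
  induction u with
  | nil => simp
  | cons c u' ih =>
    intro v hu
    simp only [List.mem_cons, not_or] at hu
    rw [List.cons_append, repl1, if_neg]
    · rw [ih v hu.2]; simp
    · simp [List.isPrefixOf]
      intro hc; exact absurd hc hu.1


-- A's sequential passes also replace the "Xth" (X = 4..9) that the '3rd' pass freshly creates
-- out of "X3rd"; scanC is the single scan with that extra window rule.
def scanC (P : List pvEnt) : List Char → List Char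
  | [] => []
  | c :: t =>
    match P.find? (fun e => c == e.1 && e.2.1 == 't' && e.2.2.1 == 'h' && ['3','r','d'].isPrefixOf t) with
    | some e => e.2.2.2 ++ 'i' :: 'r' :: 'd' :: scanC P (t.drop 3)
    | none =>
      match P.find? (fun e => c == e.1 && [e.2.1, e.2.2.1].isPrefixOf t) with
      | some e => e.2.2.2 ++ scanC P (t.drop 2)
      | none => c :: scanC P t
termination_by l => l.length
decreasing_by all_goals (simp [List.length_drop]; try omega)

theorem scanC_cons_spec {P : List pvEnt} {c : Char} {t : List Char} {e : pvEnt}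
    (h : P.find? (fun e => c == e.1 && e.2.1 == 't' && e.2.2.1 == 'h' && ['3','r','d'].isPrefixOf t) = some e) :
    scanC P (c :: t) = e.2.2.2 ++ 'i' :: 'r' :: 'd' :: scanC P (t.drop 3) := by
  rw [scanC, h]

theorem scanC_cons_norm {P : List pvEnt} {c : Char} {t : List Char} {e : pvEnt}
    (h0 : P.find? (fun e => c == e.1 && e.2.1 == 't' && e.2.2.1 == 'h' && ['3','r','d'].isPrefixOf t) = none)
    (h : P.find? (fun e => c == e.1 && [e.2.1, e.2.2.1].isPrefixOf t) = some e) :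
    scanC P (c :: t) = e.2.2.2 ++ scanC P (t.drop 2) := by
  rw [scanC, h0, h]

theorem scanC_cons_none {P : List pvEnt} {c : Char} {t : List Char}
    (h0 : P.find? (fun e => c == e.1 && e.2.1 == 't' && e.2.2.1 == 'h' && ['3','r','d'].isPrefixOf t) = none)
    (h : P.find? (fun e => c == e.1 && [e.2.1, e.2.2.1].isPrefixOf t) = none) :
    scanC P (c :: t) = c :: scanC P t := by
  rw [scanC, h0, h]

theorem scanC_nil (P : List pvEnt) : scanC P [] = [] := by rw [scanC]

theorem repl1_nil (d x y : Char) (w : List Char) : repl1 d x y w [] = [] := by rw [repl1]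

theorem scanP_nil_right (P : List pvEnt) : scanP P [] = [] := by rw [scanP]

theorem find?_unique {α : Type} (P : List α) (p : α → Bool) (a : α)
    (ha : a ∈ P) (hpa : p a = true) (huniq : ∀ b ∈ P, p b = true → b = a) :
    P.find? p = some a := by
  induction P with
  | nil => simp at ha
  | cons b Q ih =>
    by_cases hpb : p b = true
    · rw [List.find?_cons_of_pos hpb, huniq b (by simp) hpb]
    · rw [List.find?_cons_of_neg hpb]
      rcases List.mem_cons.mp ha with h | h
      · subst h; exact absurd hpa hpb
      · exact ih h (fun b hb hpb' => huniq b (List.mem_cons_of_mem _ hb) hpb')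

theorem prefix_pair_append {x y : Char} {u z : List Char} (hu : 2 ≤ u.length)
    (h : [x, y] <+: u ++ z) : u.take 2 = [x, y] := by
  have := List.prefix_iff_eq_take.mp h
  simp at this
  rw [List.take_append_of_le_length hu] at this
  exact this.symm

theorem prefix_singleton_head {y : Char} {s : List Char} (h : [y] <+: s) :
    s.head? = some y := by
  rcases h with ⟨z, hz⟩; subst hz; simp


theorem step (P : List pvEnt) (d x y : Char) (w : List Char)
    (hA1 : ∀ e ∈ P, e.1 ≠ d)
    (hA6 : ∀ e ∈ P, e.1 ≠ x ∧ e.1 ≠ y)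
    (hA5 : ∀ e ∈ P, d ∉ e.2.2.2)
    (hA7 : ∀ e ∈ P, 2 ≤ e.2.2.2.length)
    (hA4 : ∀ e ∈ P, e.2.2.2.head? ≠ some y) :
    ∀ (n : Nat) (l : List Char), l.length ≤ n →
      (∀ e ∈ P, e.2.2.2.take 2 = [x, y] → ¬ ([d, e.1, e.2.1, e.2.2.1] <:+: l)) →
      repl1 d x y w (scanP P l) = scanP (P ++ [(d,x,y,w)]) l := by
  intro n
  induction n with
  | zero =>
    intro l hl _
    have : l = [] := by cases l <;> simp_all
    subst this; simp [scanP, repl1]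
  | succ n ih =>
    intro l hl hA3
    match l with
    | [] => simp [scanP, repl1]
    | c :: t =>
      have hA3' : ∀ (s : List Char), s <:+ (c :: t) →
          ∀ e ∈ P, e.2.2.2.take 2 = [x, y] → ¬ ([d, e.1, e.2.1, e.2.2.1] <:+: s) := by
        intro s hs e he hw hinf
        exact hA3 e he hw (hinf.trans hs.isInfix)
      cases hfind : P.find? (fun e => c == e.1 && [e.2.1, e.2.2.1].isPrefixOf t) with
      | some e =>
        have he : e ∈ P := List.mem_of_find?_eq_some hfind
        rw [scanP_cons_of_some hfind]
        rw [scanP_cons_of_some (P := P ++ [(d,x,y,w)]) (e := e) (by rw [List.find?_append, hfind]; rfl)]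
        rw [repl1_skip d x y w _ _ (hA5 e he)]
        rw [ih (t.drop 2) (by simp at hl ⊢; omega)
            (hA3' _ ((List.drop_suffix 2 t).trans (List.suffix_cons c t)))]
      | none =>
        rw [scanP_cons_of_none hfind]
        by_cases hq : [d,x,y].isPrefixOf (c :: t)
        · -- q fires at the head
          have hq' := List.isPrefixOf_iff_prefix.mp hq
          rcases hq' with ⟨rest, hrest⟩
          have hc : c = d := by simpa using congrArg List.head? hrest.symm
          have ht : t = x :: y :: rest := by
            have := congrArg List.tail hrest; simp at this; exact this.symm
          subst hc ht
          rw [scanP_cons_of_some (P := P ++ [(c,x,y,w)]) (e := (c,x,y,w)) (by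
            rw [List.find?_append, hfind]
            simp [List.isPrefixOf])]
          have hx : List.find? (fun e => x == e.1 && [e.2.1, e.2.2.1].isPrefixOf (y :: rest)) P = none := by
            rw [List.find?_eq_none]; intro e he; simp [(hA6 e he).1.symm]
          have hy : List.find? (fun e => y == e.1 && [e.2.1, e.2.2.1].isPrefixOf rest) P = none := by
            rw [List.find?_eq_none]; intro e he; simp [(hA6 e he).2.symm]
          rw [scanP_cons_of_none hx, scanP_cons_of_none hy]
          rw [repl1, if_pos (by simp [List.isPrefixOf])]
          simp only [List.drop_succ_cons, List.drop_zero]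
          rw [ih rest (by simp at hl; omega)
              (hA3' _ (((List.suffix_cons y rest).trans (List.suffix_cons x _)).trans (List.suffix_cons c _)))]
        · -- no pattern fires at the head
          have hnone : ∀ e ∈ P, ¬ (c == e.1 && [e.2.1, e.2.2.1].isPrefixOf t) = true := by
            intro e he; have := List.find?_eq_none.mp hfind e he; simpa using this
          rw [scanP_cons_of_none (P := P ++ [(d,x,y,w)]) (by
            rw [List.find?_append, hfind]
            simp only [Option.none_or]
            have hqb : (c == d && [x, y].isPrefixOf t) = false := by
              by_contra hcontra
              simp only [Bool.not_eq_false, Bool.and_eq_true, beq_iff_eq] at hcontra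
              exact hq (by simp [List.isPrefixOf, hcontra.1, hcontra.2])
            simp [hqb])]
          have hnofire : ¬ ([d,x,y].isPrefixOf (c :: scanP P t) = true) := by
            intro hpre
            rw [List.isPrefixOf_iff_prefix] at hpre
            have hc : c = d := by
              rcases hpre with ⟨z, hz⟩
              simpa using congrArg List.head? hz.symm
            have hxy : [x, y] <+: scanP P t := by
              rcases hpre with ⟨z, hz⟩
              have := congrArg List.tail hz
              simp at this
              exact ⟨z, this⟩
            match t, hxy with
            | [], hxy => simp [scanP] at hxy
            | t0 :: t1, hxy =>
              cases hfind2 : P.find? (fun e => t0 == e.1 && [e.2.1, e.2.2.1].isPrefixOf t1) with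
              | some e2 =>
                rw [scanP_cons_of_some hfind2] at hxy
                have he2 : e2 ∈ P := List.mem_of_find?_eq_some hfind2
                have hfe2 := List.find?_some hfind2
                simp only [Bool.and_eq_true, beq_iff_eq] at hfe2
                have htake := prefix_pair_append (hA7 e2 he2) hxy
                apply hA3 e2 he2 htake
                have hpre2 := List.isPrefixOf_iff_prefix.mp hfe2.2
                rcases hpre2 with ⟨z2, hz2⟩
                exact ⟨[], z2, by simp [hc, hfe2.1.symm, ← hz2]⟩
              | none =>
                rw [scanP_cons_of_none hfind2] at hxy
                have ht0 : t0 = x := by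
                  rcases hxy with ⟨z, hz⟩
                  simpa using congrArg List.head? hz.symm
                have hy1 : [y] <+: scanP P t1 := by
                  rcases hxy with ⟨z, hz⟩
                  have := congrArg List.tail hz
                  simp at this
                  exact ⟨z, this⟩
                match t1, hy1 with
                | [], hy1 => simp [scanP] at hy1
                | u :: u1, hy1 =>
                  cases hfind3 : P.find? (fun e => u == e.1 && [e.2.1, e.2.2.1].isPrefixOf u1) with
                  | some e3 =>
                    rw [scanP_cons_of_some hfind3] at hy1
                    have he3 : e3 ∈ P := List.mem_of_find?_eq_some hfind3
                    have hh := prefix_singleton_head hy1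
                    rw [List.head?_append_of_ne_nil] at hh
                    · exact hA4 e3 he3 hh
                    · intro hnil
                      have := hA7 e3 he3
                      rw [hnil] at this; simp at this
                  | none =>
                    rw [scanP_cons_of_none hfind3] at hy1
                    have hu : u = y := by
                      rcases hy1 with ⟨z, hz⟩
                      simpa using congrArg List.head? hz.symm
                    exact hq (by simp [List.isPrefixOf, hc, ht0, hu])
          rw [repl1, if_neg hnofire]
          rw [ih t (by simp at hl; omega) (hA3' _ (List.suffix_cons c t))]

theorem isPrefixOf_pair (a b : Char) (t : List Char) :
    ([a,b].isPrefixOf t = true) ↔ t.take 2 = [a,b] := by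
  rw [List.isPrefixOf_iff_prefix, List.prefix_iff_eq_take]
  simp [eq_comm]

theorem scanP_pats_eq_scanB : ∀ (n : Nat) (l : List Char), l.length ≤ n →
    scanP pvPats l = scanB l := by
  intro n
  induction n with
  | zero =>
    intro l hl
    have : l = [] := by cases l <;> simp_all
    subst this; simp [scanP, scanB]
  | succ n ih =>
    intro l hl
    match l with
    | [] => simp [scanP, scanB]
    | c :: t =>
      have iht := ih t (by simp at hl; omega)
      have ihd := ih (t.drop 2) (by simp at hl ⊢; omega)
      by_cases h1 : c = '1'
      · subst h1
        have hfind : pvPats.find? (fun e => '1' == e.1 && [e.2.1, e.2.2.1].isPrefixOf t)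
            = if ['s','t'].isPrefixOf t then some ('1','s','t',"first".toList) else none := by
          cases hpre : ['s','t'].isPrefixOf t <;> simp [pvPats, List.find?, hpre]
        rw [scanP, scanB, hfind, show pvWords.get? '1' = some "first".toList from rfl,
          show pvSuffix.getD '1' [] = "st".toList from rfl]
        cases hpre : ['s','t'].isPrefixOf t
        · have ht2 : ¬ (t.take 2 = ['s','t']) := by
            rw [← isPrefixOf_pair]; simp [hpre]
          simp only [hpre, if_false, Bool.false_eq_true]
          simp [ht2, iht]
        · have ht2 : t.take 2 = ['s','t'] := (isPrefixOf_pair _ _ _).mp hpre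
          simp only [hpre, if_true]
          simp [ht2, ihd]
      by_cases h2 : c = '2'
      · subst h2
        have hfind : pvPats.find? (fun e => '2' == e.1 && [e.2.1, e.2.2.1].isPrefixOf t)
            = if ['n','d'].isPrefixOf t then some ('2','n','d',"second".toList) else none := by
          cases hpre : ['n','d'].isPrefixOf t <;> simp [pvPats, List.find?, hpre]
        rw [scanP, scanB, hfind, show pvWords.get? '2' = some "second".toList from rfl,
          show pvSuffix.getD '2' [] = "nd".toList from rfl]
        cases hpre : ['n','d'].isPrefixOf t
        · have ht2 : ¬ (t.take 2 = ['n','d']) := by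
            rw [← isPrefixOf_pair]; simp [hpre]
          simp only [hpre, if_false, Bool.false_eq_true]
          simp [ht2, iht]
        · have ht2 : t.take 2 = ['n','d'] := (isPrefixOf_pair _ _ _).mp hpre
          simp only [hpre, if_true]
          simp [ht2, ihd]
      by_cases h3 : c = '3'
      · subst h3
        have hfind : pvPats.find? (fun e => '3' == e.1 && [e.2.1, e.2.2.1].isPrefixOf t)
            = if ['r','d'].isPrefixOf t then some ('3','r','d',"third".toList) else none := by
          cases hpre : ['r','d'].isPrefixOf t <;> simp [pvPats, List.find?, hpre]
        rw [scanP, scanB, hfind, show pvWords.get? '3' = some "third".toList from rfl,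
          show pvSuffix.getD '3' [] = "rd".toList from rfl]
        cases hpre : ['r','d'].isPrefixOf t
        · have ht2 : ¬ (t.take 2 = ['r','d']) := by
            rw [← isPrefixOf_pair]; simp [hpre]
          simp only [hpre, if_false, Bool.false_eq_true]
          simp [ht2, iht]
        · have ht2 : t.take 2 = ['r','d'] := (isPrefixOf_pair _ _ _).mp hpre
          simp only [hpre, if_true]
          simp [ht2, ihd]
      by_cases h4 : c = '4'
      · subst h4
        have hfind : pvPats.find? (fun e => '4' == e.1 && [e.2.1, e.2.2.1].isPrefixOf t)
            = if ['t','h'].isPrefixOf t then some ('4','t','h',"fourth".toList) else none := by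
          cases hpre : ['t','h'].isPrefixOf t <;> simp [pvPats, List.find?, hpre]
        rw [scanP, scanB, hfind, show pvWords.get? '4' = some "fourth".toList from rfl,
          show pvSuffix.getD '4' [] = "th".toList from rfl]
        cases hpre : ['t','h'].isPrefixOf t
        · have ht2 : ¬ (t.take 2 = ['t','h']) := by
            rw [← isPrefixOf_pair]; simp [hpre]
          simp only [hpre, if_false, Bool.false_eq_true]
          simp [ht2, iht]
        · have ht2 : t.take 2 = ['t','h'] := (isPrefixOf_pair _ _ _).mp hpre
          simp only [hpre, if_true]
          simp [ht2, ihd]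
      by_cases h5 : c = '5'
      · subst h5
        have hfind : pvPats.find? (fun e => '5' == e.1 && [e.2.1, e.2.2.1].isPrefixOf t)
            = if ['t','h'].isPrefixOf t then some ('5','t','h',"fifth".toList) else none := by
          cases hpre : ['t','h'].isPrefixOf t <;> simp [pvPats, List.find?, hpre]
        rw [scanP, scanB, hfind, show pvWords.get? '5' = some "fifth".toList from rfl,
          show pvSuffix.getD '5' [] = "th".toList from rfl]
        cases hpre : ['t','h'].isPrefixOf t
        · have ht2 : ¬ (t.take 2 = ['t','h']) := by
            rw [← isPrefixOf_pair]; simp [hpre]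
          simp only [hpre, if_false, Bool.false_eq_true]
          simp [ht2, iht]
        · have ht2 : t.take 2 = ['t','h'] := (isPrefixOf_pair _ _ _).mp hpre
          simp only [hpre, if_true]
          simp [ht2, ihd]
      by_cases h6 : c = '6'
      · subst h6
        have hfind : pvPats.find? (fun e => '6' == e.1 && [e.2.1, e.2.2.1].isPrefixOf t)
            = if ['t','h'].isPrefixOf t then some ('6','t','h',"sixth".toList) else none := by
          cases hpre : ['t','h'].isPrefixOf t <;> simp [pvPats, List.find?, hpre]
        rw [scanP, scanB, hfind, show pvWords.get? '6' = some "sixth".toList from rfl,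
          show pvSuffix.getD '6' [] = "th".toList from rfl]
        cases hpre : ['t','h'].isPrefixOf t
        · have ht2 : ¬ (t.take 2 = ['t','h']) := by
            rw [← isPrefixOf_pair]; simp [hpre]
          simp only [hpre, if_false, Bool.false_eq_true]
          simp [ht2, iht]
        · have ht2 : t.take 2 = ['t','h'] := (isPrefixOf_pair _ _ _).mp hpre
          simp only [hpre, if_true]
          simp [ht2, ihd]
      by_cases h7 : c = '7'
      · subst h7
        have hfind : pvPats.find? (fun e => '7' == e.1 && [e.2.1, e.2.2.1].isPrefixOf t)
            = if ['t','h'].isPrefixOf t then some ('7','t','h',"seventh".toList) else none := by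
          cases hpre : ['t','h'].isPrefixOf t <;> simp [pvPats, List.find?, hpre]
        rw [scanP, scanB, hfind, show pvWords.get? '7' = some "seventh".toList from rfl,
          show pvSuffix.getD '7' [] = "th".toList from rfl]
        cases hpre : ['t','h'].isPrefixOf t
        · have ht2 : ¬ (t.take 2 = ['t','h']) := by
            rw [← isPrefixOf_pair]; simp [hpre]
          simp only [hpre, if_false, Bool.false_eq_true]
          simp [ht2, iht]
        · have ht2 : t.take 2 = ['t','h'] := (isPrefixOf_pair _ _ _).mp hpre
          simp only [hpre, if_true]
          simp [ht2, ihd]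
      by_cases h8 : c = '8'
      · subst h8
        have hfind : pvPats.find? (fun e => '8' == e.1 && [e.2.1, e.2.2.1].isPrefixOf t)
            = if ['t','h'].isPrefixOf t then some ('8','t','h',"eighth".toList) else none := by
          cases hpre : ['t','h'].isPrefixOf t <;> simp [pvPats, List.find?, hpre]
        rw [scanP, scanB, hfind, show pvWords.get? '8' = some "eighth".toList from rfl,
          show pvSuffix.getD '8' [] = "th".toList from rfl]
        cases hpre : ['t','h'].isPrefixOf t
        · have ht2 : ¬ (t.take 2 = ['t','h']) := by
            rw [← isPrefixOf_pair]; simp [hpre]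
          simp only [hpre, if_false, Bool.false_eq_true]
          simp [ht2, iht]
        · have ht2 : t.take 2 = ['t','h'] := (isPrefixOf_pair _ _ _).mp hpre
          simp only [hpre, if_true]
          simp [ht2, ihd]
      by_cases h9 : c = '9'
      · subst h9
        have hfind : pvPats.find? (fun e => '9' == e.1 && [e.2.1, e.2.2.1].isPrefixOf t)
            = if ['t','h'].isPrefixOf t then some ('9','t','h',"ninth".toList) else none := by
          cases hpre : ['t','h'].isPrefixOf t <;> simp [pvPats, List.find?, hpre]
        rw [scanP, scanB, hfind, show pvWords.get? '9' = some "ninth".toList from rfl,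
          show pvSuffix.getD '9' [] = "th".toList from rfl]
        cases hpre : ['t','h'].isPrefixOf t
        · have ht2 : ¬ (t.take 2 = ['t','h']) := by
            rw [← isPrefixOf_pair]; simp [hpre]
          simp only [hpre, if_false, Bool.false_eq_true]
          simp [ht2, iht]
        · have ht2 : t.take 2 = ['t','h'] := (isPrefixOf_pair _ _ _).mp hpre
          simp only [hpre, if_true]
          simp [ht2, ihd]
      have b1 : (c == '1') = false := by simp [h1]
      have c1 : ('1' == c) = false := by simp [Ne.symm h1]
      have b2 : (c == '2') = false := by simp [h2]
      have c2 : ('2' == c) = false := by simp [Ne.symm h2]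
      have b3 : (c == '3') = false := by simp [h3]
      have c3 : ('3' == c) = false := by simp [Ne.symm h3]
      have b4 : (c == '4') = false := by simp [h4]
      have c4 : ('4' == c) = false := by simp [Ne.symm h4]
      have b5 : (c == '5') = false := by simp [h5]
      have c5 : ('5' == c) = false := by simp [Ne.symm h5]
      have b6 : (c == '6') = false := by simp [h6]
      have c6 : ('6' == c) = false := by simp [Ne.symm h6]
      have b7 : (c == '7') = false := by simp [h7]
      have c7 : ('7' == c) = false := by simp [Ne.symm h7]
      have b8 : (c == '8') = false := by simp [h8]
      have c8 : ('8' == c) = false := by simp [Ne.symm h8]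
      have b9 : (c == '9') = false := by simp [h9]
      have c9 : ('9' == c) = false := by simp [Ne.symm h9]
      have hfind : pvPats.find? (fun e => c == e.1 && [e.2.1, e.2.2.1].isPrefixOf t) = none := by
        simp [pvPats, List.find?, b1, b2, b3, b4, b5, b6, b7, b8, b9]
      have hget : pvWords.get? c = none := by
        simp [pvWords, PySem.Dict.ofList, PySem.Dict.get?, PySem.Dict.update, PySem.Dict.empty,
          PySem.Dict.insert, List.find?, c1, c2, c3, c4, c5, c6, c7, c8, c9]
      rw [scanP, scanB, hfind, hget]
      simp [iht]
set_option maxHeartbeats 1000000 in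
theorem stepC (P : List pvEnt) (d : Char) (w : List Char)
    (hA1 : ∀ e ∈ P, e.1 ≠ d)
    (hTH : ∀ e ∈ P, e.1 ≠ 't' ∧ e.1 ≠ 'h')
    (huniq3 : ∀ e ∈ P, e.1 = '3' → e = ('3','r','d',('t'::'h'::'i'::'r'::'d'::[])))
    (h3 : ('3','r','d',('t'::'h'::'i'::'r'::'d'::[])) ∈ P)
    (hA5 : ∀ e ∈ P, d ∉ e.2.2.2)
    (hdi : d ∉ (['i','r','d'] : List Char))
    (hA7 : ∀ e ∈ P, 2 ≤ e.2.2.2.length)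
    (hA4 : ∀ e ∈ P, e.2.2.2.head? ≠ some 'h')
    (hTake2 : ∀ e ∈ P, e.2.2.2.take 2 = ['t','h'] → e.1 = '3')
    (hSpecW : ∀ e ∈ P, e.2.1 = 't' → e.2.2.1 = 'h' → e.2.2.2.take 2 ≠ ['t','h']) :
    ∀ (n : Nat) (l : List Char), l.length ≤ n →
      repl1 d 't' 'h' w (scanC P l) = scanC (P ++ [(d,'t','h',w)]) l := by
  intro n
  induction n with
  | zero =>
    intro l hl
    have : l = [] := by cases l <;> simp_all
    subst this; rw [scanC_nil, repl1_nil, scanC_nil]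
  | succ n ih =>
    intro l hl
    match l with
    | [] => rw [scanC_nil, repl1_nil, scanC_nil]
    | c :: t =>
      cases hspec : P.find? (fun e => c == e.1 && e.2.1 == 't' && e.2.2.1 == 'h' && ['3','r','d'].isPrefixOf t) with
      | some e =>
        have he : e ∈ P := List.mem_of_find?_eq_some hspec
        rw [scanC_cons_spec hspec]
        rw [scanC_cons_spec (P := P ++ [(d,'t','h',w)]) (e := e)
            (by rw [List.find?_append, hspec]; rfl)]
        rw [show e.2.2.2 ++ 'i' :: 'r' :: 'd' :: scanC P (t.drop 3)
              = (e.2.2.2 ++ ['i','r','d']) ++ scanC P (t.drop 3) by simp]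
        rw [repl1_skip d 't' 'h' w _ _ (by
          intro hmem
          rcases List.mem_append.mp hmem with h | h
          · exact hA5 e he h
          · exact hdi h)]
        rw [ih (t.drop 3) (by simp at hl ⊢; omega)]
        simp
      | none =>
        cases hnorm : P.find? (fun e => c == e.1 && [e.2.1, e.2.2.1].isPrefixOf t) with
        | some e =>
          have he : e ∈ P := List.mem_of_find?_eq_some hnorm
          have hfe := List.find?_some hnorm
          simp only [Bool.and_eq_true, beq_iff_eq] at hfe
          rw [scanC_cons_norm hspec hnorm]
          have hcd : c ≠ d := by rw [hfe.1]; exact hA1 e he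
          rw [scanC_cons_norm (P := P ++ [(d,'t','h',w)]) (e := e)
              (h0 := by rw [List.find?_append, hspec]; simp [hcd])
              (h := by rw [List.find?_append, hnorm]; rfl)]
          rw [repl1_skip d 't' 'h' w _ _ (hA5 e he)]
          rw [ih (t.drop 2) (by simp at hl ⊢; omega)]
        | none =>
          by_cases hqs : c = d ∧ ['3','r','d'].isPrefixOf t
          · -- the cascade window fires for the new pattern
            obtain ⟨hc, hpre3⟩ := hqs
            subst hc
            obtain ⟨v, hv⟩ := List.isPrefixOf_iff_prefix.mp hpre3
            have ht : t = '3' :: 'r' :: 'd' :: v := by rw [← hv]; rfl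
            subst ht
            rw [scanC_cons_none hspec hnorm]
            -- the inner scan: '3rd' is replaced normally
            have hs3 : P.find? (fun e => '3' == e.1 && e.2.1 == 't' && e.2.2.1 == 'h' && ['3','r','d'].isPrefixOf ('r'::'d'::v)) = none := by
              rw [List.find?_eq_none]
              intro e he hpe
              simp only [Bool.and_eq_true, beq_iff_eq] at hpe
              have := huniq3 e he hpe.1.1.1.symm
              rw [this] at hpe
              simp at hpe
            have hn3 : P.find? (fun e => '3' == e.1 && [e.2.1, e.2.2.1].isPrefixOf ('r'::'d'::v)) = some ('3','r','d',('t'::'h'::'i'::'r'::'d'::[])) := by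
              apply find?_unique _ _ _ h3 (by simp [List.isPrefixOf])
              intro b hb hpb
              simp only [Bool.and_eq_true, beq_iff_eq] at hpb
              exact huniq3 b hb hpb.1.symm
            rw [scanC_cons_norm hs3 hn3]
            rw [repl1, if_pos (by simp [List.isPrefixOf])]
            simp only [show (('3','r','d',('t'::'h'::'i'::'r'::'d'::[])) : pvEnt).2.2.2
                = 't'::'h'::'i'::'r'::'d'::[] from rfl, List.cons_append, List.nil_append,
              List.drop_succ_cons, List.drop_zero]
            rw [show ('i'::'r'::'d':: scanC P v) = ['i','r','d'] ++ scanC P v from rfl]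
            rw [repl1_skip c 't' 'h' w _ _ hdi]
            rw [scanC_cons_spec (P := P ++ [(c,'t','h',w)]) (e := (c,'t','h',w))
                (by rw [List.find?_append, hspec]; simp [List.isPrefixOf])]
            rw [ih v (by simp at hl; omega)]
            simp
          · -- no cascade window for the new pattern
            have hsR : (P ++ [(d,'t','h',w)]).find? (fun e => c == e.1 && e.2.1 == 't' && e.2.2.1 == 'h' && ['3','r','d'].isPrefixOf t) = none := by
              rw [List.find?_append, hspec]
              simp only [Option.none_or]
              rw [List.find?_eq_none]
              intro e he
              simp only [List.mem_singleton] at he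
              subst he
              intro hp
              simp only [Bool.and_eq_true, beq_iff_eq] at hp
              exact hqs ⟨hp.1.1.1, hp.2⟩
            by_cases hqn : [d,'t','h'].isPrefixOf (c :: t)
            · -- the new pattern fires normally
              have hq' := List.isPrefixOf_iff_prefix.mp hqn
              rcases hq' with ⟨v, hv⟩
              have hc : c = d := by simpa using congrArg List.head? hv.symm
              have ht : t = 't' :: 'h' :: v := by
                have := congrArg List.tail hv; simp at this; exact this.symm
              subst hc ht
              rw [scanC_cons_none hspec hnorm]
              have hst : P.find? (fun e => 't' == e.1 && e.2.1 == 't' && e.2.2.1 == 'h' && ['3','r','d'].isPrefixOf ('h'::v)) = none := by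
                rw [List.find?_eq_none]; intro e he hp
                simp only [Bool.and_eq_true, beq_iff_eq] at hp
                exact (hTH e he).1 hp.1.1.1.symm
              have hnt : P.find? (fun e => 't' == e.1 && [e.2.1, e.2.2.1].isPrefixOf ('h'::v)) = none := by
                rw [List.find?_eq_none]; intro e he hp
                simp only [Bool.and_eq_true, beq_iff_eq] at hp
                exact (hTH e he).1 hp.1.symm
              have hsh : P.find? (fun e => 'h' == e.1 && e.2.1 == 't' && e.2.2.1 == 'h' && ['3','r','d'].isPrefixOf v) = none := by
                rw [List.find?_eq_none]; intro e he hp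
                simp only [Bool.and_eq_true, beq_iff_eq] at hp
                exact (hTH e he).2 hp.1.1.1.symm
              have hnh : P.find? (fun e => 'h' == e.1 && [e.2.1, e.2.2.1].isPrefixOf v) = none := by
                rw [List.find?_eq_none]; intro e he hp
                simp only [Bool.and_eq_true, beq_iff_eq] at hp
                exact (hTH e he).2 hp.1.symm
              rw [scanC_cons_none hst hnt, scanC_cons_none hsh hnh]
              rw [repl1, if_pos (by simp [List.isPrefixOf])]
              rw [show List.drop 2 ('t' :: 'h' :: scanC P v) = scanC P v from rfl]
              rw [scanC_cons_norm (P := P ++ [(c,'t','h',w)]) (e := (c,'t','h',w))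
                  (h0 := hsR)
                  (h := by rw [List.find?_append, hnorm]; simp [List.isPrefixOf])]
              rw [ih v (by simp at hl; omega)]
              rfl
            · -- nothing fires at the head
              rw [scanC_cons_none hspec hnorm]
              have hnofire : ¬ ([d,'t','h'].isPrefixOf (c :: scanC P t) = true) := by
                intro hpre
                rw [List.isPrefixOf_iff_prefix] at hpre
                have hc : c = d := by
                  rcases hpre with ⟨z, hz⟩
                  simpa using congrArg List.head? hz.symm
                have hxy : ['t','h'] <+: scanC P t := by
                  rcases hpre with ⟨z, hz⟩
                  have := congrArg List.tail hz
                  simp at this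
                  exact ⟨z, this⟩
                have hsplit : t = [] ∨ ∃ a b, t = a :: b := by cases t <;> simp
                rcases hsplit with ht | ⟨t0, t1, ht⟩
                · subst ht; rw [scanC_nil] at hxy; simp at hxy
                ·   subst ht
                    cases hspec2 : P.find? (fun e => t0 == e.1 && e.2.1 == 't' && e.2.2.1 == 'h' && ['3','r','d'].isPrefixOf t1) with
                    | some e2 =>
                      rw [scanC_cons_spec hspec2] at hxy
                      have he2 : e2 ∈ P := List.mem_of_find?_eq_some hspec2
                      have hfe2 := List.find?_some hspec2
                      simp only [Bool.and_eq_true, beq_iff_eq] at hfe2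
                      rw [show e2.2.2.2 ++ 'i' :: 'r' :: 'd' :: scanC P (t1.drop 3)
                            = e2.2.2.2 ++ (['i','r','d'] ++ scanC P (t1.drop 3)) by simp] at hxy
                      exact hSpecW e2 he2 hfe2.1.1.2 hfe2.1.2 (prefix_pair_append (hA7 e2 he2) hxy)
                    | none =>
                      cases hnorm2 : P.find? (fun e => t0 == e.1 && [e.2.1, e.2.2.1].isPrefixOf t1) with
                      | some e3 =>
                        rw [scanC_cons_norm hspec2 hnorm2] at hxy
                        have he3 : e3 ∈ P := List.mem_of_find?_eq_some hnorm2
                        have hfe3 := List.find?_some hnorm2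
                        simp only [Bool.and_eq_true, beq_iff_eq] at hfe3
                        have h31 : e3.1 = '3' := hTake2 e3 he3 (prefix_pair_append (hA7 e3 he3) hxy)
                        have he3' := huniq3 e3 he3 h31
                        rw [he3'] at hfe3
                        apply hqs
                        refine ⟨hc, ?_⟩
                        have ht0 : t0 = '3' := by simpa using hfe3.1
                        subst ht0
                        have := hfe3.2
                        simp only [List.isPrefixOf_iff_prefix] at this ⊢
                        rcases this with ⟨z, hz⟩
                        exact ⟨z, by simp [← hz]⟩
                      | none =>
                        rw [scanC_cons_none hspec2 hnorm2] at hxy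
                        have ht0 : t0 = 't' := by
                          rcases hxy with ⟨z, hz⟩
                          simpa using congrArg List.head? hz.symm
                        have hy1 : ['h'] <+: scanC P t1 := by
                          rcases hxy with ⟨z, hz⟩
                          have := congrArg List.tail hz
                          simp at this
                          exact ⟨z, this⟩
                        have hsplit1 : t1 = [] ∨ ∃ a b, t1 = a :: b := by cases t1 <;> simp
                        rcases hsplit1 with ht1 | ⟨u, u1, ht1⟩
                        · subst ht1; rw [scanC_nil] at hy1; simp at hy1
                        ·   subst ht1
                            cases hspec3 : P.find? (fun e => u == e.1 && e.2.1 == 't' && e.2.2.1 == 'h' && ['3','r','d'].isPrefixOf u1) with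
                            | some e4 =>
                              rw [scanC_cons_spec hspec3] at hy1
                              have he4 : e4 ∈ P := List.mem_of_find?_eq_some hspec3
                              have hh := prefix_singleton_head hy1
                              rw [List.head?_append_of_ne_nil] at hh
                              · exact hA4 e4 he4 hh
                              · intro hnil
                                have := hA7 e4 he4
                                rw [hnil] at this; simp at this
                            | none =>
                              cases hnorm3 : P.find? (fun e => u == e.1 && [e.2.1, e.2.2.1].isPrefixOf u1) with
                              | some e5 =>
                                rw [scanC_cons_norm hspec3 hnorm3] at hy1
                                have he5 : e5 ∈ P := List.mem_of_find?_eq_some hnorm3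
                                have hh := prefix_singleton_head hy1
                                rw [List.head?_append_of_ne_nil] at hh
                                · exact hA4 e5 he5 hh
                                · intro hnil
                                  have := hA7 e5 he5
                                  rw [hnil] at this; simp at this
                              | none =>
                                rw [scanC_cons_none hspec3 hnorm3] at hy1
                                have hu : u = 'h' := by
                                  rcases hy1 with ⟨z, hz⟩
                                  simpa using congrArg List.head? hz.symm
                                exact hqn (by simp [List.isPrefixOf, hc, ht0, hu])
              rw [repl1, if_neg hnofire]
              rw [ih t (by simp at hl; omega)]
              rw [scanC_cons_none (P := P ++ [(d,'t','h',w)]) hsR (by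
                rw [List.find?_append, hnorm]
                simp only [Option.none_or]
                rw [List.find?_eq_none]
                intro e he
                simp only [List.mem_singleton] at he
                subst he
                simp only [Bool.and_eq_true, beq_iff_eq, not_and]
                intro hcd hpre
                exact hqn (by simp [List.isPrefixOf, hcd, hpre]))]

-- without any 'th' pattern the cascade rule never fires
theorem scanC_eq_scanP_of_no_th (P : List pvEnt)
    (h : ∀ e ∈ P, ¬ (e.2.1 = 't' ∧ e.2.2.1 = 'h')) :
    ∀ (n : Nat) (l : List Char), l.length ≤ n → scanC P l = scanP P l := by
  intro n
  induction n with
  | zero =>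
    intro l hl
    have : l = [] := by cases l <;> simp_all
    subst this; rw [scanC_nil, scanP_nil_right]
  | succ n ih =>
    intro l hl
    match l with
    | [] => rw [scanC_nil, scanP_nil_right]
    | c :: t =>
      have hspec : P.find? (fun e => c == e.1 && e.2.1 == 't' && e.2.2.1 == 'h' && ['3','r','d'].isPrefixOf t) = none := by
        rw [List.find?_eq_none]
        intro e he hp
        simp only [Bool.and_eq_true, beq_iff_eq] at hp
        exact h e he ⟨hp.1.1.2, hp.1.2⟩
      cases hnorm : P.find? (fun e => c == e.1 && [e.2.1, e.2.2.1].isPrefixOf t) with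
      | some e =>
        rw [scanC_cons_norm hspec hnorm, scanP_cons_of_some hnorm,
            ih (t.drop 2) (by simp at hl ⊢; omega)]
      | none =>
        rw [scanC_cons_none hspec hnorm, scanP_cons_of_none hnorm,
            ih t (by simp at hl; omega)]

def pvOk (l : List Char) : Prop :=
  ∀ d ∈ ['4','5','6','7','8','9'], ¬ ([d,'3','r','d'] <:+: l)

theorem pvOk_suffix {s l : List Char} (hs : s <:+ l) (h : pvOk l) : pvOk s := by
  intro d hd hinf
  exact h d hd (hinf.trans hs.isInfix)

-- a cascade window at the head fires the special rule of the full pattern list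
theorem spec_some_of_window {c : Char} {t : List Char}
    (hc : c ∈ (['4','5','6','7','8','9'] : List Char)) (h3 : ['3','r','d'].isPrefixOf t = true) :
    pvPats.find? (fun e => c == e.1 && e.2.1 == 't' && e.2.2.1 == 'h' && ['3','r','d'].isPrefixOf t) ≠ none := by
  intro hnone
  rw [List.find?_eq_none] at hnone
  fin_cases hc
  · exact hnone ('4','t','h',"fourth".toList) (by simp [pvPats]) (by simp [h3])
  · exact hnone ('5','t','h',"fifth".toList) (by simp [pvPats]) (by simp [h3])
  · exact hnone ('6','t','h',"sixth".toList) (by simp [pvPats]) (by simp [h3])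
  · exact hnone ('7','t','h',"seventh".toList) (by simp [pvPats]) (by simp [h3])
  · exact hnone ('8','t','h',"eighth".toList) (by simp [pvPats]) (by simp [h3])
  · exact hnone ('9','t','h',"ninth".toList) (by simp [pvPats]) (by simp [h3])

theorem scanC_eq_scanP_of_ok :
    ∀ (n : Nat) (l : List Char), l.length ≤ n → pvOk l → scanC pvPats l = scanP pvPats l := by
  intro n
  induction n with
  | zero =>
    intro l hl _
    have : l = [] := by cases l <;> simp_all
    subst this; rw [scanC_nil, scanP_nil_right]
  | succ n ih =>
    intro l hl hok
    match l with
    | [] => rw [scanC_nil, scanP_nil_right]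
    | c :: t =>
      cases hspec : pvPats.find? (fun e => c == e.1 && e.2.1 == 't' && e.2.2.1 == 'h' && ['3','r','d'].isPrefixOf t) with
      | some e =>
        exfalso
        have he : e ∈ pvPats := List.mem_of_find?_eq_some hspec
        have hfe := List.find?_some hspec
        simp only [Bool.and_eq_true, beq_iff_eq] at hfe
        obtain ⟨z, hz⟩ := List.isPrefixOf_iff_prefix.mp hfe.2
        have hwin : [e.1,'3','r','d'] <:+: c :: t := by
          refine ⟨[], z, ?_⟩
          simp [hfe.1.1.1, ← hz]
        fin_cases he <;> simp_all <;>
          first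
          | exact hok '4' (by simp) hwin
          | exact hok '5' (by simp) hwin
          | exact hok '6' (by simp) hwin
          | exact hok '7' (by simp) hwin
          | exact hok '8' (by simp) hwin
          | exact hok '9' (by simp) hwin
      | none =>
        cases hnorm : pvPats.find? (fun e => c == e.1 && [e.2.1, e.2.2.1].isPrefixOf t) with
        | some e =>
          rw [scanC_cons_norm hspec hnorm, scanP_cons_of_some hnorm,
              ih (t.drop 2) (by simp at hl ⊢; omega)
                (pvOk_suffix ((List.drop_suffix 2 t).trans (List.suffix_cons c t)) hok)]
        | none =>
          rw [scanC_cons_none hspec hnorm, scanP_cons_of_none hnorm,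
              ih t (by simp at hl; omega) (pvOk_suffix (List.suffix_cons c t) hok)]

def pvBadL (l : List Char) : Prop :=
  ∃ d ∈ (['4','5','6','7','8','9'] : List Char), [d,'3','r','d'] <:+: l

theorem scanC_ne_scanP_of_bad :
    ∀ (n : Nat) (l : List Char), l.length ≤ n → pvBadL l → scanC pvPats l ≠ scanP pvPats l := by
  intro n
  induction n with
  | zero =>
    intro l hl hbad
    obtain ⟨d, _, hinf⟩ := hbad
    have : l = [] := by cases l <;> simp_all
    subst this
    have := hinf.length_le; simp at this
  | succ n ih =>
    intro l hl hbad
    match l with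
    | [] =>
      obtain ⟨d, _, hinf⟩ := hbad
      have := hinf.length_le; simp at this
    | c :: t =>
      cases hspec : pvPats.find? (fun e => c == e.1 && e.2.1 == 't' && e.2.2.1 == 'h' && ['3','r','d'].isPrefixOf t) with
      | some e =>
        -- A's extra cascade replacement happens right here: heads differ
        have he : e ∈ pvPats := List.mem_of_find?_eq_some hspec
        have hfe := List.find?_some hspec
        simp only [Bool.and_eq_true, beq_iff_eq] at hfe
        have hnorm : pvPats.find? (fun e => c == e.1 && [e.2.1, e.2.2.1].isPrefixOf t) = none := by
          rw [List.find?_eq_none]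
          intro e' he' hp
          simp only [Bool.and_eq_true, beq_iff_eq] at hp
          obtain ⟨z, hz⟩ := List.isPrefixOf_iff_prefix.mp hfe.2
          obtain ⟨z', hz'⟩ := List.isPrefixOf_iff_prefix.mp hp.2
          have a1 := congrArg List.head? hz
          have a2 := congrArg List.head? hz'
          simp only [List.cons_append, List.head?_cons] at a1 a2
          rw [← a2] at a1
          have h31 : e'.2.1 = '3' := (Option.some.inj a1).symm
          clear a1 a2 hz hz' hp
          fin_cases he' <;> simp at h31
        rw [scanC_cons_spec hspec, scanP_cons_of_none hnorm]
        intro heq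
        have hh := congrArg List.head? heq
        have hce : c = e.1 := hfe.1.1.1
        rw [hce] at hh
        clear heq ih hbad hspec hnorm hl
        fin_cases he <;> simp_all
      | none =>
        have hbt : pvBadL t := by
          obtain ⟨d, hd, hinf⟩ := hbad
          rcases List.infix_cons_iff.mp hinf with hpre | htail
          · exfalso
            obtain ⟨z, hz⟩ := hpre
            have hc : c = d := by simpa using congrArg List.head? hz.symm
            subst hc
            refine spec_some_of_window hd ?_ hspec
            rw [List.isPrefixOf_iff_prefix]
            exact ⟨z, by have := congrArg List.tail hz; simpa using this⟩
          · exact ⟨d, hd, htail⟩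
        cases hnorm : pvPats.find? (fun e => c == e.1 && [e.2.1, e.2.2.1].isPrefixOf t) with
        | some e =>
          have he : e ∈ pvPats := List.mem_of_find?_eq_some hnorm
          have hfe := List.find?_some hnorm
          simp only [Bool.and_eq_true, beq_iff_eq] at hfe
          obtain ⟨z, hz⟩ := List.isPrefixOf_iff_prefix.mp hfe.2
          have hbd : pvBadL (t.drop 2) := by
            obtain ⟨d, hd, hinf⟩ := hbt
            refine ⟨d, hd, ?_⟩
            rw [← hz] at hinf ⊢
            rcases List.infix_cons_iff.mp hinf with hpre | h1
            · exfalso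
              obtain ⟨z', hz'⟩ := hpre
              have hde : e.2.1 = d := by simpa using congrArg List.head? hz'.symm
              clear ih hz' hz hbad
              fin_cases he <;> (subst hde; exact absurd hd (by decide))
            · rcases List.infix_cons_iff.mp h1 with hpre | h2
              · exfalso
                obtain ⟨z', hz'⟩ := hpre
                have hde : e.2.2.1 = d := by simpa using congrArg List.head? hz'.symm
                clear ih hz' hz hbad
                fin_cases he <;> (subst hde; exact absurd hd (by decide))
              · simpa using h2
          rw [scanC_cons_norm hspec hnorm, scanP_cons_of_some hnorm]
          intro heq
          exact ih (t.drop 2) (by simp at hl ⊢; omega) hbd (List.append_cancel_left heq)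
        | none =>
          rw [scanC_cons_none hspec hnorm, scanP_cons_of_none hnorm]
          intro heq
          exact ih t (by simp at hl; omega) hbt (by simpa using heq)

theorem main_eqC (l : List Char) :
    repl1 '9' 't' 'h' "ninth".toList (repl1 '8' 't' 'h' "eighth".toList
      (repl1 '7' 't' 'h' "seventh".toList (repl1 '6' 't' 'h' "sixth".toList
      (repl1 '5' 't' 'h' "fifth".toList (repl1 '4' 't' 'h' "fourth".toList
      (repl1 '3' 'r' 'd' "third".toList (repl1 '2' 'n' 'd' "second".toList
      (repl1 '1' 's' 't' "first".toList l)))))))) = scanC pvPats l := by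
  have s1 : repl1 '1' 's' 't' "first".toList (l) = scanP [('1','s','t',"first".toList)] l := by
    have hstep := step [] '1' 's' 't' "first".toList (by simp) (by simp) (by simp) (by simp) (by simp)
      l.length l (le_refl _) (by simp)
    rw [scanP_nil] at hstep
    simpa using hstep
  have s2 : repl1 '2' 'n' 'd' "second".toList (scanP [('1','s','t',"first".toList)] l) = scanP [('1','s','t',"first".toList), ('2','n','d',"second".toList)] l := by
    have hstep := step [('1','s','t',"first".toList)] '2' 'n' 'd' "second".toList (by decide) (by decide) (by decide) (by decide) (by decide)
      l.length l (le_refl _) (by intro e he hw; fin_cases he <;> simp_all)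
    simpa using hstep
  have s3 : repl1 '3' 'r' 'd' "third".toList (scanP [('1','s','t',"first".toList), ('2','n','d',"second".toList)] l) = scanP [('1','s','t',"first".toList), ('2','n','d',"second".toList), ('3','r','d',"third".toList)] l := by
    have hstep := step [('1','s','t',"first".toList), ('2','n','d',"second".toList)] '3' 'r' 'd' "third".toList (by decide) (by decide) (by decide) (by decide) (by decide)
      l.length l (le_refl _) (by intro e he hw; fin_cases he <;> simp_all)
    simpa using hstep
  have hc3 : scanP [('1','s','t',"first".toList), ('2','n','d',"second".toList), ('3','r','d',"third".toList)] l = scanC [('1','s','t',"first".toList), ('2','n','d',"second".toList), ('3','r','d',"third".toList)] l :=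
    (scanC_eq_scanP_of_no_th [('1','s','t',"first".toList), ('2','n','d',"second".toList), ('3','r','d',"third".toList)] (by decide) l.length l (le_refl _)).symm
  have s4 : repl1 '4' 't' 'h' "fourth".toList (scanC [('1','s','t',"first".toList), ('2','n','d',"second".toList), ('3','r','d',"third".toList)] l) = scanC [('1','s','t',"first".toList), ('2','n','d',"second".toList), ('3','r','d',"third".toList), ('4','t','h',"fourth".toList)] l := by
    have hstep := stepC [('1','s','t',"first".toList), ('2','n','d',"second".toList), ('3','r','d',"third".toList)] '4' "fourth".toList (by decide) (by decide) (by decide) (by decide)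
      (by decide) (by decide) (by decide) (by decide) (by decide) (by decide)
      l.length l (le_refl _)
    simpa using hstep
  have s5 : repl1 '5' 't' 'h' "fifth".toList (scanC [('1','s','t',"first".toList), ('2','n','d',"second".toList), ('3','r','d',"third".toList), ('4','t','h',"fourth".toList)] l) = scanC [('1','s','t',"first".toList), ('2','n','d',"second".toList), ('3','r','d',"third".toList), ('4','t','h',"fourth".toList), ('5','t','h',"fifth".toList)] l := by
    have hstep := stepC [('1','s','t',"first".toList), ('2','n','d',"second".toList), ('3','r','d',"third".toList), ('4','t','h',"fourth".toList)] '5' "fifth".toList (by decide) (by decide) (by decide) (by decide)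
      (by decide) (by decide) (by decide) (by decide) (by decide) (by decide)
      l.length l (le_refl _)
    simpa using hstep
  have s6 : repl1 '6' 't' 'h' "sixth".toList (scanC [('1','s','t',"first".toList), ('2','n','d',"second".toList), ('3','r','d',"third".toList), ('4','t','h',"fourth".toList), ('5','t','h',"fifth".toList)] l) = scanC [('1','s','t',"first".toList), ('2','n','d',"second".toList), ('3','r','d',"third".toList), ('4','t','h',"fourth".toList), ('5','t','h',"fifth".toList), ('6','t','h',"sixth".toList)] l := by
    have hstep := stepC [('1','s','t',"first".toList), ('2','n','d',"second".toList), ('3','r','d',"third".toList), ('4','t','h',"fourth".toList), ('5','t','h',"fifth".toList)] '6' "sixth".toList (by decide) (by decide) (by decide) (by decide)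
      (by decide) (by decide) (by decide) (by decide) (by decide) (by decide)
      l.length l (le_refl _)
    simpa using hstep
  have s7 : repl1 '7' 't' 'h' "seventh".toList (scanC [('1','s','t',"first".toList), ('2','n','d',"second".toList), ('3','r','d',"third".toList), ('4','t','h',"fourth".toList), ('5','t','h',"fifth".toList), ('6','t','h',"sixth".toList)] l) = scanC [('1','s','t',"first".toList), ('2','n','d',"second".toList), ('3','r','d',"third".toList), ('4','t','h',"fourth".toList), ('5','t','h',"fifth".toList), ('6','t','h',"sixth".toList), ('7','t','h',"seventh".toList)] l := by
    have hstep := stepC [('1','s','t',"first".toList), ('2','n','d',"second".toList), ('3','r','d',"third".toList), ('4','t','h',"fourth".toList), ('5','t','h',"fifth".toList), ('6','t','h',"sixth".toList)] '7' "seventh".toList (by decide) (by decide) (by decide) (by decide)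
      (by decide) (by decide) (by decide) (by decide) (by decide) (by decide)
      l.length l (le_refl _)
    simpa using hstep
  have s8 : repl1 '8' 't' 'h' "eighth".toList (scanC [('1','s','t',"first".toList), ('2','n','d',"second".toList), ('3','r','d',"third".toList), ('4','t','h',"fourth".toList), ('5','t','h',"fifth".toList), ('6','t','h',"sixth".toList), ('7','t','h',"seventh".toList)] l) = scanC [('1','s','t',"first".toList), ('2','n','d',"second".toList), ('3','r','d',"third".toList), ('4','t','h',"fourth".toList), ('5','t','h',"fifth".toList), ('6','t','h',"sixth".toList), ('7','t','h',"seventh".toList), ('8','t','h',"eighth".toList)] l := by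
    have hstep := stepC [('1','s','t',"first".toList), ('2','n','d',"second".toList), ('3','r','d',"third".toList), ('4','t','h',"fourth".toList), ('5','t','h',"fifth".toList), ('6','t','h',"sixth".toList), ('7','t','h',"seventh".toList)] '8' "eighth".toList (by decide) (by decide) (by decide) (by decide)
      (by decide) (by decide) (by decide) (by decide) (by decide) (by decide)
      l.length l (le_refl _)
    simpa using hstep
  have s9 : repl1 '9' 't' 'h' "ninth".toList (scanC [('1','s','t',"first".toList), ('2','n','d',"second".toList), ('3','r','d',"third".toList), ('4','t','h',"fourth".toList), ('5','t','h',"fifth".toList), ('6','t','h',"sixth".toList), ('7','t','h',"seventh".toList), ('8','t','h',"eighth".toList)] l) = scanC [('1','s','t',"first".toList), ('2','n','d',"second".toList), ('3','r','d',"third".toList), ('4','t','h',"fourth".toList), ('5','t','h',"fifth".toList), ('6','t','h',"sixth".toList), ('7','t','h',"seventh".toList), ('8','t','h',"eighth".toList), ('9','t','h',"ninth".toList)] l := by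
    have hstep := stepC [('1','s','t',"first".toList), ('2','n','d',"second".toList), ('3','r','d',"third".toList), ('4','t','h',"fourth".toList), ('5','t','h',"fifth".toList), ('6','t','h',"sixth".toList), ('7','t','h',"seventh".toList), ('8','t','h',"eighth".toList)] '9' "ninth".toList (by decide) (by decide) (by decide) (by decide)
      (by decide) (by decide) (by decide) (by decide) (by decide) (by decide)
      l.length l (le_refl _)
    simpa using hstep
  rw [s1, s2, s3, hc3, s4, s5, s6, s7, s8, s9]
  rfl

theorem alt_toList (text : String) :
    (replace_numeric_oridinals_alt text).toList = scanB text.toList := by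
  simp [replace_numeric_oridinals_alt]

theorem a_toList (text : String) :
    (replace_numeric_oridinals text).toList =
      repl1 '9' 't' 'h' "ninth".toList (repl1 '8' 't' 'h' "eighth".toList
        (repl1 '7' 't' 'h' "seventh".toList (repl1 '6' 't' 'h' "sixth".toList
        (repl1 '5' 't' 'h' "fifth".toList (repl1 '4' 't' 'h' "fourth".toList
        (repl1 '3' 'r' 'd' "third".toList (repl1 '2' 'n' 'd' "second".toList
        (repl1 '1' 's' 't' "first".toList text.toList)))))))) := by
  have hA : replace_numeric_oridinals text =
      PySem.Str.replace (PySem.Str.replace (PySem.Str.replace (PySem.Str.replace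
        (PySem.Str.replace (PySem.Str.replace (PySem.Str.replace (PySem.Str.replace
        (PySem.Str.replace text "1st" "first") "2nd" "second") "3rd" "third")
        "4th" "fourth") "5th" "fifth") "6th" "sixth") "7th" "seventh")
        "8th" "eighth") "9th" "ninth" := rfl
  rw [hA]
  simp only [PySem.Str.toList_replace]
  rw [show ("1st" : String).toList = ['1','s','t'] from rfl,
      show ("2nd" : String).toList = ['2','n','d'] from rfl,
      show ("3rd" : String).toList = ['3','r','d'] from rfl,
      show ("4th" : String).toList = ['4','t','h'] from rfl,
      show ("5th" : String).toList = ['5','t','h'] from rfl,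
      show ("6th" : String).toList = ['6','t','h'] from rfl,
      show ("7th" : String).toList = ['7','t','h'] from rfl,
      show ("8th" : String).toList = ['8','t','h'] from rfl,
      show ("9th" : String).toList = ['9','t','h'] from rfl]
  simp only [chars_replace_eq]

theorem pvInfix_iff (p l : List Char) : pvInfix p l = true ↔ p <:+: l := by
  rw [pvInfix, List.any_eq_true]
  constructor
  · rintro ⟨t, ht, hp⟩
    exact List.infix_iff_prefix_suffix.mpr
      ⟨t, List.isPrefixOf_iff_prefix.mp hp, (List.mem_tails _ _).mp ht⟩
  · intro h
    rcases List.infix_iff_prefix_suffix.mp h with ⟨t, hp, hs⟩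
    exact ⟨t, (List.mem_tails _ _).mpr hs, List.isPrefixOf_iff_prefix.mpr hp⟩

theorem notD_pvOk (text : String) (hD : ¬ D_replace_numeric_oridinals text) :
    pvOk text.toList := by
  intro d hd hinf
  exact hD (List.any_eq_true.mpr ⟨d, hd, (pvInfix_iff _ _).mpr hinf⟩)

theorem witness_alt : replace_numeric_oridinals_alt "43rd" = "4third" := by
  have hB : scanB ['4','3','r','d'] = "4third".toList := by
    rw [scanB, show pvWords.get? '4' = some "fourth".toList from rfl]
    simp only [show pvSuffix.getD '4' [] = ['t','h'] from rfl,
      show List.take 2 ['3','r','d'] = ['3','r'] from rfl, reduceIte]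
    rw [scanB, show pvWords.get? '3' = some "third".toList from rfl]
    simp only [show pvSuffix.getD '3' [] = ['r','d'] from rfl,
      show List.take 2 ['r','d'] = ['r','d'] from rfl, reduceIte]
    rw [show List.drop 2 ['r','d'] = ([] : List Char) from rfl, scanB]
    rfl
  have : (replace_numeric_oridinals_alt "43rd").toList = "4third".toList := by
    rw [alt_toList, show ("43rd" : String).toList = ['4','3','r','d'] from rfl, hB]
  exact String.toList_injective this

-- ===== VERDICT (by name: the statement is the Claim_ definition above) =====
theorem replace_numeric_oridinals_spec : Claim_unchanged_replace_numeric_oridinals := by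
  intro text _ hD
  apply String.toList_injective
  rw [a_toList, alt_toList, main_eqC,
      scanC_eq_scanP_of_ok text.toList.length text.toList (le_refl _) (notD_pvOk text hD),
      scanP_pats_eq_scanB text.toList.length text.toList (le_refl _)]

theorem replace_numeric_oridinals_changed : Claim_changed_replace_numeric_oridinals := by
  unfold Claim_changed_replace_numeric_oridinals
  refine ⟨by decide, by decide, by decide, witness_alt, by decide⟩

theorem replace_numeric_oridinals_tight : Claim_exact_replace_numeric_oridinals := by
  intro text _ hD heq
  have hbad : pvBadL text.toList := by
    obtain ⟨d, hd, hinf⟩ := List.any_eq_true.mp hD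
    exact ⟨d, hd, (pvInfix_iff _ _).mp hinf⟩
  have h1 := congrArg String.toList heq
  rw [a_toList, alt_toList, main_eqC] at h1
  rw [← scanP_pats_eq_scanB text.toList.length text.toList (le_refl _)] at h1
  exact scanC_ne_scanP_of_bad text.toList.length text.toList (le_refl _) hbad h1
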